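-- pv_equiv track=rewrite | github.com/t1ooo/geeksforgeeks | eulers-totient-function/main.py | maximizeEulerRatioV3
-- ===== SOURCE A (Python) =====
-- def sieveV3(n):
--     nums = [True for x in range(n+1)]
--     nums[0] = False
--     nums[1] = False
--
--     p = 2
--     while p*p <= n:
--         if nums[p]:
--             for i in range(p*p, n+1, p):
--                 nums[i] = False
--         p += 1
--
--     primes = []
--     for i in range(2, n+1):
--         if nums[i]:
--             primes.append(i)
--
--     return primes
--
-- def maximizeEulerRatioV3(N):
--     primes = sieveV3(50)
--     curr = 1
--     for p in primes:
--         next = curr * p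
--         if next > N:
--             break
--         curr = next
--     return curr
-- ===== SOURCE B (Python) =====
-- # Prefix products of the primes <= 50, in increasing order: 2, 2*3, 2*3*5, ...
-- _PREFIX_PRODUCTS = [
--     2, 6, 30, 210, 2310, 30030, 510510, 9699690, 223092870,
--     6469693230, 200560490130, 7420738134810, 304250263527210,
--     13082761331670030, 614889782588491410,
-- ]
--
-- def maximizeEulerRatioV3(N):
--     # largest prefix product not exceeding N; 1 if none fits
--     return max((x for x in _PREFIX_PRODUCTS if x <= N), default=1)
-- ===== Notes on version B (the rewrite author's own statement) =====
-- stated objective: simpler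
-- what changed: Replaces the sieve-then-multiply-with-break loop by a precomputed table of prefix products of the primes up to 50, selecting the largest table entry <= N (default 1).
import Mathlib
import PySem

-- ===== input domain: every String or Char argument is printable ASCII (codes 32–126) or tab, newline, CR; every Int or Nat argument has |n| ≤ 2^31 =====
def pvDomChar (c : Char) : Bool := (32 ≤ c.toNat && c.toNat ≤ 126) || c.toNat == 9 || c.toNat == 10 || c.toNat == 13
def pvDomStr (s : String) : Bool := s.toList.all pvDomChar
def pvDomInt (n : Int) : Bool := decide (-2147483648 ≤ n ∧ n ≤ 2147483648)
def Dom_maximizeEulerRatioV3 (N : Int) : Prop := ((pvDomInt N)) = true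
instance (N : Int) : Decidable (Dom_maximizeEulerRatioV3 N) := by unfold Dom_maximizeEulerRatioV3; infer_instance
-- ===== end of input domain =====

-- B replaces A's sieve + multiply-with-break loop by a precomputed table of prefix
-- products of the primes up to 50, selecting the largest entry ≤ N (default 1); objective: simpler.

-- ===== PORT A =====
-- the inner 'for i in range(p*p, n+1, p): nums[i] = False' loop; indices are nonnegative
-- and in range here, so List.set i.toNat is exact for Python's nums[i] = False
def sieveMark (nums : List Bool) (idxs : List Int) : List Bool :=
  idxs.foldl (fun a i => a.set i.toNat false) nums

-- the 'while p*p <= n' loop of sieveV3, with a structural fuel counter that only guards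
-- totality ((n+1).toNat steps always suffice, since the loop runs only while p ≤ n from p = 2);
-- nums[p] read via getD p.toNat (p is in range whenever the body runs for the call sieveV3 50)
def sieveLoop (n : Int) : Nat → List Bool → Int → List Bool
  | 0, nums, _ => nums
  | fuel + 1, nums, p =>
    if p * p ≤ n then
      let nums' := if nums.getD p.toNat false
                   then sieveMark nums (PySem.List.pyRange (p * p) (n + 1) p)
                   else nums
      sieveLoop n fuel nums' (p + 1)
    else nums

def sieveV3 (n : Int) : List Int :=
  let nums := (PySem.List.pyRange 0 (n + 1) 1).map (fun _ => true)
  let nums := nums.set 0 false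
  let nums := nums.set 1 false
  let nums := sieveLoop n (n + 1).toNat nums 2
  (PySem.List.pyRange 2 (n + 1) 1).foldl
    (fun primes i => if nums.getD i.toNat false then primes ++ [i] else primes) []

-- the 'for p in primes' loop with its break ('next = curr * p' inlined)
def eulerLoop (N : Int) (curr : Int) : List Int → Int
  | [] => curr
  | p :: ps => if curr * p > N then curr else eulerLoop N (curr * p) ps

def maximizeEulerRatioV3 (N : Int) : Int :=
  eulerLoop N 1 (sieveV3 50)

-- ===== PORT B =====
def prefixProducts : List Int :=
  [2, 6, 30, 210, 2310, 30030, 510510, 9699690, 223092870,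
   6469693230, 200560490130, 7420738134810, 304250263527210,
   13082761331670030, 614889782588491410]

-- max((x for x in _PREFIX_PRODUCTS if x <= N), default=1)
def maximizeEulerRatioV3_alt (N : Int) : Int :=
  (prefixProducts.filter (fun x => x ≤ N)).foldl max 1

-- ===== PRECONDITION & SPEC =====
def Spec_maximizeEulerRatioV3 (N : Int) (out : Int) : Prop := out = maximizeEulerRatioV3_alt N
instance (N : Int) (out : Int) : Decidable (Spec_maximizeEulerRatioV3 N out) := by unfold Spec_maximizeEulerRatioV3; infer_instance

-- ===== CLAIM (what is proved, stated in full; the proofs are below) =====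
def Claim_equal_maximizeEulerRatioV3 : Prop := ∀ (N : Int), Dom_maximizeEulerRatioV3 N → Spec_maximizeEulerRatioV3 N (maximizeEulerRatioV3 N)

-- ===== LEMMAS AND PROOFS =====

-- the list of running products curr*p1, curr*p1*p2, … that A's loop walks through
def pref (curr : Int) : List Int → List Int
  | [] => []
  | p :: ps => (curr * p) :: pref (curr * p) ps

lemma pref_lower (c : Int) (ps : List Int) (hc : 0 ≤ c) (hps : ∀ p ∈ ps, 2 ≤ p) :
    ∀ x ∈ pref c ps, 2 * c ≤ x := by
  induction ps generalizing c with
  | nil => simp [pref]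
  | cons p ps ih =>
    intro x hx
    have hp : 2 ≤ p := hps p (by simp)
    have hcp : 2 * c ≤ c * p := by nlinarith
    simp only [pref, List.mem_cons] at hx
    rcases hx with rfl | hx
    · exact hcp
    · have := ih (c * p) (by positivity) (fun q hq => hps q (by simp [hq])) x hx
      nlinarith

lemma foldl_step_const (N a : Int) (l : List Int) (h : ∀ x ∈ l, ¬ x ≤ N) :
    l.foldl (fun a x => if x ≤ N then max a x else a) a = a := by
  induction l generalizing a with
  | nil => rfl
  | cons x xs ih =>
    simp only [List.foldl_cons, if_neg (h x (by simp))]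
    exact ih a (fun y hy => h y (by simp [hy]))

lemma loop_eq (ps : List Int) (N curr : Int) (hc : 1 ≤ curr) (hps : ∀ p ∈ ps, 2 ≤ p) :
    eulerLoop N curr ps
      = (pref curr ps).foldl (fun a x => if x ≤ N then max a x else a) curr := by
  induction ps generalizing curr with
  | nil => rfl
  | cons p ps ih =>
    have hp : 2 ≤ p := hps p (by simp)
    have hcc : curr ≤ curr * p := by nlinarith
    simp only [eulerLoop, pref, List.foldl_cons]
    by_cases hgt : curr * p > N
    · rw [if_pos hgt, if_neg (by omega)]
      exact (foldl_step_const N curr _ (fun x hx => by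
        have := pref_lower (curr * p) ps (by positivity) (fun q hq => hps q (by simp [hq])) x hx
        omega)).symm
    · rw [if_neg hgt, if_pos (by omega), max_eq_right hcc]
      exact ih (curr * p) (by nlinarith) (fun q hq => hps q (by simp [hq]))

lemma filter_foldl_max (N : Int) (l : List Int) (a : Int) :
    (l.filter (fun x => x ≤ N)).foldl max a
      = l.foldl (fun a x => if x ≤ N then max a x else a) a := by
  induction l generalizing a with
  | nil => rfl
  | cons x xs ih =>
    by_cases h : x ≤ N <;> simp [h, ih]

lemma sieve50 : sieveV3 50 = [2, 3, 5, 7, 11, 13, 17, 19, 23, 29, 31, 37, 41, 43, 47] := by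
  decide

lemma pref_primes : pref 1 [2, 3, 5, 7, 11, 13, 17, 19, 23, 29, 31, 37, 41, 43, 47]
    = prefixProducts := by decide

-- ===== VERDICT (by name: the statement is the Claim_ definition above) =====
theorem maximizeEulerRatioV3_spec : Claim_equal_maximizeEulerRatioV3 := by
  intro N _
  show maximizeEulerRatioV3 N = maximizeEulerRatioV3_alt N
  rw [maximizeEulerRatioV3, maximizeEulerRatioV3_alt, sieve50, filter_foldl_max, ← pref_primes,
    loop_eq _ _ _ le_rfl (by decide)]
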